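-- pv_equiv track=rewrite | github.com/igmor/advent | 2023/p4/p4.py | p12
-- ===== SOURCE A (Python) =====
-- from typing import List, Tuple
--
-- def p12(cards: List[Tuple[List[int], List[int]]]) -> int:
--     total = 0
--     for i, c in enumerate(cards):
--         wins = set(c[0])
--         m = 0
--         for yn in c[1]:
--             if yn in wins:
--                 if m:
--                     m *= 2
--                 else:
--                     m = 1
--         total += m
--
--     return total
-- ===== SOURCE B (Python) =====
-- from typing import List, Tuple
--
-- def p12(cards: List[Tuple[List[int], List[int]]]) -> int:
--     total = 0
--     for c in cards:
--         ws = sorted(set(c[0]))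
--         ys = sorted(c[1])
--         i = j = m = 0
--         while i < len(ws) and j < len(ys):
--             if ws[i] < ys[j]:
--                 i += 1
--             elif ys[j] < ws[i]:
--                 j += 1
--             else:
--                 m += 1
--                 j += 1
--         total += 2 ** (m - 1) if m else 0
--     return total
-- ===== Notes on version B (the rewrite author's own statement) =====
-- stated objective: alternative
-- what changed: Replaces hash-set membership tests with doubling by a sort of both lists followed by a two-pointer merge scan that counts matches (keeping multiplicity of the have-list), then one closed-form score 2**(m-1) per card.
import Mathlib
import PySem

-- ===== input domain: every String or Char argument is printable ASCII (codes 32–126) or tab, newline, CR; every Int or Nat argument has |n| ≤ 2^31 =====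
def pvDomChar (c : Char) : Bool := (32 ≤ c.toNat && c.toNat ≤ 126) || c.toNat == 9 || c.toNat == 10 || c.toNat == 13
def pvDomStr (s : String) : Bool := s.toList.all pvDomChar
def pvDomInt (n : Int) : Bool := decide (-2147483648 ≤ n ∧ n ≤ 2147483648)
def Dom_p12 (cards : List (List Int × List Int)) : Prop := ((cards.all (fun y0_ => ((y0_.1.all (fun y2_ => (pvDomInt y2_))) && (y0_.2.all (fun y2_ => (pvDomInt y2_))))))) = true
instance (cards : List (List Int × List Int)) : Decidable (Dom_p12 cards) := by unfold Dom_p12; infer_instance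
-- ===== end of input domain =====

-- B sorts both lists of each card and counts matches by a two-pointer merge scan, scoring 2^(m-1) (alternative algorithm, no mutation).

-- ===== PORT A =====
def p12 (cards : List (List Int × List Int)) : Int :=
  cards.foldl (fun total c =>
    let wins : PySem.Set Int := PySem.Set.ofList c.1
    let m := c.2.foldl (fun m yn =>
      if PySem.Set.contains wins yn then (if m ≠ 0 then m * 2 else 1) else m) 0
    total + m) 0

-- ===== PORT B =====
-- Source B's while loop over indices i, j ported as the obvious structural recursion
-- on the unscanned suffixes (exact: same comparisons, same advance of i / j / m).
def mergeCountB (ws ys : List Int) : Int :=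
  match ws, ys with
  | [], _ => 0
  | _, [] => 0
  | w :: ws', y :: ys' =>
    if w < y then mergeCountB ws' (y :: ys')
    else if y < w then mergeCountB (w :: ws') ys'
    else 1 + mergeCountB (w :: ws') ys'

def p12_alt (cards : List (List Int × List Int)) : Int :=
  cards.foldl (fun total c =>
    let ws := PySem.List.sorted (PySem.Set.ofList c.1) (fun x => x) false
    let ys := PySem.List.sorted c.2 (fun x => x) false
    let m := mergeCountB ws ys
    total + (if m ≠ 0 then (2 : Int) ^ (m - 1).toNat else 0)) 0

-- ===== PRECONDITION & SPEC =====
def Spec_p12 (cards : List (List Int × List Int)) (out : Int) : Prop := out = p12_alt cards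
instance (cards : List (List Int × List Int)) (out : Int) : Decidable (Spec_p12 cards out) := by unfold Spec_p12; infer_instance

-- ===== CLAIM (what is proved, stated in full; the proofs are below) =====
def Claim_equal_p12 : Prop := ∀ (cards : List (List Int × List Int)), Dom_p12 cards → Spec_p12 cards (p12 cards)

-- ===== LEMMAS AND PROOFS =====

-- On a strictly increasing ws and a nondecreasing ys, the merge scan counts the
-- elements of ys (with multiplicity) that occur in ws.
theorem mergeCountB_eq_countP (ws ys : List Int)
    (hw : ws.Pairwise (· < ·)) (hy : ys.Pairwise (· ≤ ·)) :
    mergeCountB ws ys = (ys.countP (fun y => decide (y ∈ ws)) : Int) := by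
  induction ys generalizing ws with
  | nil => cases ws <;> simp [mergeCountB]
  | cons y ys' ihy =>
    induction ws with
    | nil => simp [mergeCountB]
    | cons w ws' ihw =>
      have hw' := (List.pairwise_cons.mp hw).2
      have hwlt := (List.pairwise_cons.mp hw).1
      have hy' := (List.pairwise_cons.mp hy).2
      have hyle := (List.pairwise_cons.mp hy).1
      by_cases h1 : w < y
      · -- w smaller than every element of y :: ys' ⇒ w never matches
        rw [mergeCountB, if_pos h1, ihw hw']
        congr 1
        apply List.countP_congr
        intro z hz
        rw [List.mem_cons] at hz
        have hyz : y ≤ z := by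
          rcases hz with rfl | hz
          · exact le_refl z
          · exact hyle z hz
        simp only [decide_eq_true_eq, List.mem_cons]
        constructor
        · intro hm; exact Or.inr hm
        · rintro (rfl | hm)
          · omega
          · exact hm
      · by_cases h2 : y < w
        · -- y smaller than every element of w :: ws' ⇒ y ∉ ws
          rw [mergeCountB, if_neg h1, if_pos h2, ihy (w :: ws') hw hy']
          rw [List.countP_cons]
          have hnot : ¬ (y ∈ w :: ws') := by
            simp only [List.mem_cons]
            rintro (rfl | hm)
            · omega
            · exact absurd (hwlt y hm) (by omega)
          simp [hnot]
        · -- equal heads: match, advance ys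
          have heq : w = y := by omega
          rw [mergeCountB, if_neg h1, if_neg h2, ihy (w :: ws') hw hy']
          rw [List.countP_cons]
          simp [heq.symm, List.mem_cons]
          omega

-- A's inner loop from a positive accumulator just doubles per match.
theorem p12_inner_pos (p : Int → Bool) (l : List Int) (m : Int) (hm : 0 < m) :
    l.foldl (fun m yn => if p yn then (if m ≠ 0 then m * 2 else 1) else m) m
      = m * 2 ^ (l.countP p) := by
  induction l generalizing m with
  | nil => simp
  | cons a t ih =>
    simp only [List.foldl_cons]
    by_cases h : p a
    · have hne : m ≠ 0 := by omega
      rw [List.countP_cons_of_pos h, if_pos h, if_pos hne, ih (m * 2) (by omega), pow_succ]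
      ring
    · rw [List.countP_cons_of_neg (by simpa using h), if_neg h, ih m hm]

-- A's inner loop from 0 computes the closed-form score 2^(count-1) (0 when no match).
theorem p12_inner (p : Int → Bool) (l : List Int) :
    l.foldl (fun m yn => if p yn then (if m ≠ 0 then m * 2 else 1) else m) (0 : Int)
      = (if l.countP p = 0 then 0 else (2 : Int) ^ (l.countP p - 1)) := by
  induction l with
  | nil => simp
  | cons a t ih =>
    simp only [List.foldl_cons]
    by_cases h : p a
    · rw [List.countP_cons_of_pos h, if_pos h, if_neg (by simp : ¬((0:Int) ≠ 0)),
        p12_inner_pos p t 1 (by norm_num), if_neg (by omega : ¬(t.countP p + 1 = 0))]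
      simp
    · rw [List.countP_cons_of_neg (by simpa using h), if_neg h, ih]

-- The two per-card contributions agree.
theorem p12_card (c : List Int × List Int) :
    (c.2.foldl (fun m yn =>
      if PySem.Set.contains (PySem.Set.ofList c.1) yn then (if m ≠ 0 then m * 2 else 1) else m) (0 : Int))
    = (let ws := PySem.List.sorted (PySem.Set.ofList c.1) (fun x => x) false
       let ys := PySem.List.sorted c.2 (fun x => x) false
       let m := mergeCountB ws ys
       if m ≠ 0 then (2 : Int) ^ (m - 1).toNat else 0) := by
  simp only []
  rw [p12_inner]
  rw [mergeCountB_eq_countP _ _ (PySem.List.sorted_ofList_pairwise_lt c.1)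
        (PySem.List.sorted_pairwise c.2 (fun x => x) )]
  have hperm : (PySem.List.sorted c.2 (fun x => x) false).Perm c.2 :=
    PySem.List.sorted_perm c.2 (fun x => x) false
  rw [hperm.countP_eq]
  have hpeq : (fun y => decide (y ∈ PySem.List.sorted (PySem.Set.ofList c.1) (fun x => x) false))
      = (PySem.Set.ofList c.1).contains := by
    funext y
    simp [PySem.List.mem_sorted]
  rw [hpeq]
  generalize (List.countP (PySem.Set.ofList c.1).contains c.2) = n
  cases n with
  | zero => norm_num
  | succ k =>
    rw [if_neg (Nat.succ_ne_zero k), if_pos (by exact_mod_cast Nat.succ_ne_zero k)]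
    congr 1
    omega

-- ===== VERDICT (by name: the statement is the Claim_ definition above) =====
theorem p12_spec : Claim_equal_p12 := by
  intro cards _
  unfold Spec_p12 p12 p12_alt
  have hf : (fun (total : Int) (c : List Int × List Int) =>
      total + (c.2.foldl (fun m yn =>
        if PySem.Set.contains (PySem.Set.ofList c.1) yn then (if m ≠ 0 then m * 2 else 1) else m) 0))
    = (fun (total : Int) (c : List Int × List Int) =>
      total + (let ws := PySem.List.sorted (PySem.Set.ofList c.1) (fun x => x) false
               let ys := PySem.List.sorted c.2 (fun x => x) false
               let m := mergeCountB ws ys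
               if m ≠ 0 then (2 : Int) ^ (m - 1).toNat else 0)) := by
    funext total c
    rw [p12_card]
  rw [hf]
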